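-- pv_equiv track=rewrite | github.com/Saleh-Abd-Elrahman/NLP_Shakespeare | ngrams.py | create_bigram_counts
-- ===== SOURCE A (Python) =====
-- from collections import defaultdict, Counter
--
-- def create_bigrams(tokens):
--     bigrams = []
--     for i in range(len(tokens) - 1):
--         bigrams.append((tokens[i], tokens[i+1]))
--     return bigrams
--
-- def create_bigram_counts(tokens):
--
--     from_bigram_to_next_token_counts = defaultdict(lambda: defaultdict(int))
--     bigrams = create_bigrams(tokens)
--
--     for i in range(len(bigrams) - 1):
--         current_bigram = bigrams[i]
--         next_word = bigrams[i+1][1]  # The second word of the next bigram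
--         from_bigram_to_next_token_counts[current_bigram][next_word] += 1
--
--     return from_bigram_to_next_token_counts
-- ===== SOURCE B (Python) =====
-- from collections import defaultdict, Counter
--
-- def create_bigram_counts(tokens):
--     # Group-by decomposition: list the trigrams once, dedup the leading
--     # bigrams in first-occurrence order, then for each distinct bigram count
--     # the next tokens of its whole group with one Counter and install it.
--     trigrams = list(zip(tokens, tokens[1:], tokens[2:]))
--     distinct_bigrams = list(dict.fromkeys((w1, w2) for w1, w2, _ in trigrams))
--     result = defaultdict(lambda: defaultdict(int))
--     for key in distinct_bigrams:
--         result[key].update(Counter(nxt for w1, w2, nxt in trigrams if (w1, w2) == key))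
--     return result
-- ===== Notes on version B (the rewrite author's own statement) =====
-- stated objective: alternative
-- what changed: Replaces A's single streaming pass with per-occurrence nested increments by a group-by decomposition: build the trigram list, dedup the leading bigrams in first-occurrence order, then for each distinct bigram scan its whole group once and install one Counter of its next tokens.
import Mathlib
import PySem

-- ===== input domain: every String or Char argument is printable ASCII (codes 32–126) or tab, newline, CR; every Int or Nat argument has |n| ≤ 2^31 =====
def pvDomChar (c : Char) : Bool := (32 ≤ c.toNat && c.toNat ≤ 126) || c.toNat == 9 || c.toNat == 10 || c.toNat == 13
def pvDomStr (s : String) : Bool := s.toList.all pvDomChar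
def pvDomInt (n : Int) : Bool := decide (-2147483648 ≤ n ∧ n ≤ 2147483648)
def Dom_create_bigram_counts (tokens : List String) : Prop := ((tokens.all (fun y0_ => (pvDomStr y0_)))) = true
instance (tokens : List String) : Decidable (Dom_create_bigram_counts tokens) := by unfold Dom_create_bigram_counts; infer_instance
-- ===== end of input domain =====

-- B replaces A's streaming pass of per-occurrence nested increments by a group-by
-- decomposition (dedup the bigram keys, then one Counter per group); same results.

-- ===== PORT A =====
def create_bigrams (tokens : List String) : List (String × String) :=
  (PySem.List.pyRange 0 ((tokens.length : Int) - 1)).foldl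
    (fun bigrams i =>
      bigrams ++ [(PySem.List.pyGetD tokens i "", PySem.List.pyGetD tokens (i + 1) "")]) []

def create_bigram_counts (tokens : List String) : List (String × String × List (String × Int)) :=
  let bigrams := create_bigrams tokens
  let d := (PySem.List.pyRange 0 ((bigrams.length : Int) - 1)).foldl
    (fun d i =>
      let current_bigram := PySem.List.pyGetD bigrams i ("", "")
      let next_word := (PySem.List.pyGetD bigrams (i + 1) ("", "")).2
      d.insert current_bigram
        ((d.getD current_bigram PySem.Dict.empty).modify next_word 0 (· + 1)))
    PySem.Dict.empty
  d.items.map (fun p => (p.1.1, p.1.2, p.2.items))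

-- ===== PORT B =====
def create_bigram_counts_alt (tokens : List String) : List (String × String × List (String × Int)) :=
  let trigrams := tokens.zip ((PySem.List.slice tokens (some 1) none).zip (PySem.List.slice tokens (some 2) none))
  let distinct_bigrams := PySem.List.dedup (trigrams.map (fun t => (t.1, t.2.1)))
  let result := distinct_bigrams.foldl
    (fun d key =>
      d.insert key ((d.getD key PySem.Dict.empty).update
        (PySem.Dict.counter ((trigrams.filter (fun t => (t.1, t.2.1) == key)).map (fun t => t.2.2))).items))
    (PySem.Dict.empty : PySem.Dict (String × String) (PySem.Dict String Int))
  result.items.map (fun p => (p.1.1, p.1.2, p.2.items))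

-- ===== PRECONDITION & SPEC =====
def Spec_create_bigram_counts (tokens : List String) (out : List (String × String × List (String × Int))) : Prop := out = create_bigram_counts_alt tokens
instance (tokens : List String) (out : List (String × String × List (String × Int))) : Decidable (Spec_create_bigram_counts tokens out) := by unfold Spec_create_bigram_counts; infer_instance

-- ===== CLAIM (what is proved, stated in full; the proofs are below) =====
def Claim_equal_create_bigram_counts : Prop := ∀ (tokens : List String), Dom_create_bigram_counts tokens → Spec_create_bigram_counts tokens (create_bigram_counts tokens)

-- ===== LEMMAS AND PROOFS =====

-- the list of trigrams, and the projections both programs key on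
def pvTri (tokens : List String) : List (String × String × String) :=
  tokens.zip ((tokens.drop 1).zip (tokens.drop 2))
def pvTriK (t : String × String × String) : String × String := (t.1, t.2.1)
def pvTriN (t : String × String × String) : String := t.2.2

-- value at an outer key of a nested insert/modify loop = inner loop over the matching items
theorem pv_getD_nested {κ κ' β : Type} [BEq κ] [LawfulBEq κ] [DecidableEq κ] [BEq κ']
    (l : List β) (key : β → κ) (nxt : β → κ') (w : β → Int)
    (d : PySem.Dict κ (PySem.Dict κ' Int)) (k : κ) :
    (l.foldl (fun d t => d.insert (key t)
        ((d.getD (key t) PySem.Dict.empty).modify (nxt t) 0 (· + w t))) d).getD k PySem.Dict.empty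
    = (l.filter (fun t => key t = k)).foldl
        (fun inner t => inner.modify (nxt t) 0 (· + w t)) (d.getD k PySem.Dict.empty) := by
  induction l generalizing d with
  | nil => simp
  | cons t l ih =>
    simp only [List.foldl_cons, List.filter_cons]
    rw [ih]
    by_cases h : key t = k
    · simp [h]
    · simp [h, PySem.Dict.getD_insert, Ne.symm h]

theorem pv_bigrams_eq (tokens : List String) :
    create_bigrams tokens = tokens.zip (tokens.drop 1) := by
  unfold create_bigrams
  rw [PySem.List.foldl_append_singleton_eq_map]
  cases tokens with
  | nil => rfl
  | cons t rest =>
    have hlen : (((t :: rest).length : Int) - 1) = (rest.length : Int) := by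
      simp
    rw [hlen, PySem.List.pyRange_zero_natCast, List.map_map, List.nil_append]
    apply List.ext_getElem
    · simp
    · intro i h1 h2
      simp only [List.getElem_map, List.getElem_range, Function.comp_apply]
      have hi : i < (t :: rest).length - 1 := by simpa using h1
      have h1cast : ((i : Int) + 1) = ((i + 1 : Nat) : Int) := by push_cast; ring
      rw [h1cast, PySem.List.pyGetD_natCast, PySem.List.pyGetD_natCast]
      rw [List.getD_eq_getElem _ _ (by omega), List.getD_eq_getElem _ _ (by omega),
          List.getElem_zip, List.getElem_drop]
      simp [Nat.add_comm]

theorem pv_A_loop_eq (tokens : List String) :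
    (PySem.List.pyRange 0 ((((tokens.zip (tokens.drop 1))).length : Int) - 1)).map
      (fun i => (PySem.List.pyGetD (tokens.zip (tokens.drop 1)) i ("", ""),
                 (PySem.List.pyGetD (tokens.zip (tokens.drop 1)) (i + 1) ("", "")).2))
    = (pvTri tokens).map (fun t => (pvTriK t, pvTriN t)) := by
  match tokens with
  | [] => rfl
  | [a] => rfl
  | a :: b :: rest =>
    have hlen : ((((a :: b :: rest).zip ((a :: b :: rest).drop 1)).length : Int) - 1)
        = (rest.length : Int) := by
      simp
    rw [hlen, PySem.List.pyRange_zero_natCast, List.map_map]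
    apply List.ext_getElem
    · simp [pvTri]; omega
    · intro i h1 h2
      simp only [List.getElem_map, List.getElem_range, Function.comp_apply]
      have hi : i < rest.length := by simpa using h1
      have h1cast : ((i : Int) + 1) = ((i + 1 : Nat) : Int) := by push_cast; ring
      rw [h1cast, PySem.List.pyGetD_natCast, PySem.List.pyGetD_natCast]
      rw [List.getD_eq_getElem _ _ (by simp; omega), List.getD_eq_getElem _ _ (by simp; omega)]
      simp [pvTri, pvTriK, pvTriN, List.getElem_zip]
      cases i with
      | zero => simp
      | succ j => simp [List.getElem_zip]

theorem pv_foldl_eq_of_map_eq {α β γ δ : Type} (l1 : List α) (l2 : List β)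
    (h1 : α → γ) (h2 : β → γ) (g : δ → γ → δ) (init : δ)
    (h : l1.map h1 = l2.map h2) :
    l1.foldl (fun d x => g d (h1 x)) init = l2.foldl (fun d x => g d (h2 x)) init := by
  rw [← List.foldl_map (f := h1), ← List.foldl_map (f := h2), h]

-- A's result, re-expressed as the one fold over the trigram list
theorem pv_A_eq (tokens : List String) :
    create_bigram_counts tokens
    = ((pvTri tokens).foldl (fun d t => d.insert (pvTriK t)
        ((d.getD (pvTriK t) PySem.Dict.empty).modify (pvTriN t) 0 (· + 1)))
        PySem.Dict.empty).items.map (fun p => (p.1.1, p.1.2, p.2.items)) := by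
  unfold create_bigram_counts
  rw [pv_bigrams_eq]
  exact congrArg
    (fun d : PySem.Dict (String × String) (PySem.Dict String Int) =>
      List.map (fun p => (p.1.1, p.1.2, p.2.items)) d.items)
    (pv_foldl_eq_of_map_eq _ _
      (fun i => (PySem.List.pyGetD (tokens.zip (tokens.drop 1)) i ("", ""),
                 (PySem.List.pyGetD (tokens.zip (tokens.drop 1)) (i + 1) ("", "")).2))
      (fun t => (pvTriK t, pvTriN t))
      (fun d p => d.insert p.1 ((d.getD p.1 PySem.Dict.empty).modify p.2 0 (· + 1)))
      PySem.Dict.empty (pv_A_loop_eq tokens))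

-- pouring a nodup-keyed dict's items into an empty dict rebuilds it
theorem pv_update_empty_items {κ ν : Type} [BEq κ] [LawfulBEq κ]
    (c : PySem.Dict κ ν) (h : c.keys.Nodup) :
    (PySem.Dict.empty : PySem.Dict κ ν).update c.items = c := by
  apply PySem.Dict.ext
  have := PySem.Dict.items_foldl_insert_fresh (l := c.items) (k := fun p => p.1)
    (v := fun p => p.2) (d := (PySem.Dict.empty : PySem.Dict κ ν))
    (by intro a _; exact PySem.Dict.contains_empty _) (by simpa [PySem.Dict.keys] using h)
  simpa [PySem.Dict.update] using this

-- a fold inserting at fresh keys never sees an existing value at its key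
theorem pv_fold_fresh {κ ν : Type} [BEq κ] [LawfulBEq κ]
    (l : List κ) (c : κ → ν → ν) (e : ν) (d : PySem.Dict κ ν)
    (hnd : l.Nodup) (h : ∀ k ∈ l, d.contains k = false) :
    l.foldl (fun d k => d.insert k (c k (d.getD k e))) d
    = l.foldl (fun d k => d.insert k (c k e)) d := by
  induction l generalizing d with
  | nil => rfl
  | cons k l ih =>
    simp only [List.foldl_cons]
    rw [PySem.Dict.getD_of_not_contains d e (h k (by simp))]
    exact ih _ (List.nodup_cons.mp hnd).2 (fun k' hk' => by
      rw [PySem.Dict.contains_insert]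
      have : k' ≠ k := fun he => (List.nodup_cons.mp hnd).1 (he ▸ hk')
      simp [this, h k' (List.mem_cons_of_mem _ hk')])

-- ===== VERDICT (by name: the statement is the Claim_ definition above) =====
theorem create_bigram_counts_spec : Claim_equal_create_bigram_counts := by
  intro tokens _
  show create_bigram_counts tokens = create_bigram_counts_alt tokens
  rw [pv_A_eq]
  unfold create_bigram_counts_alt
  rw [PySem.List.slice_from tokens (a := 1) (by norm_num),
      PySem.List.slice_from tokens (a := 2) (by norm_num)]
  rw [show ((1 : Int).toNat) = 1 from rfl, show ((2 : Int).toNat) = 2 from rfl]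
  show _ = ((PySem.List.dedup ((pvTri tokens).map pvTriK)).foldl
      (fun d key => d.insert key ((d.getD key PySem.Dict.empty).update
        (PySem.Dict.counter (((pvTri tokens).filter (fun t => pvTriK t == key)).map pvTriN)).items))
      PySem.Dict.empty).items.map (fun p => (p.1.1, p.1.2, p.2.items))
  congr 1
  -- B's fold: the dedup'd keys are nodup and fresh, so each step installs the group Counter
  rw [PySem.List.dedup_eq_ofList]
  rw [pv_fold_fresh _ (fun key d => d.update
        (PySem.Dict.counter (((pvTri tokens).filter (fun t => pvTriK t == key)).map pvTriN)).items)
      PySem.Dict.empty _ (PySem.Set.nodup_ofList _) (fun k _ => PySem.Dict.contains_empty _)]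
  -- both sides: items via keys (nodup on both sides) and per-key values
  have hndA : (((pvTri tokens).foldl (fun d t => d.insert (pvTriK t)
      ((d.getD (pvTriK t) PySem.Dict.empty).modify (pvTriN t) 0 (· + 1)))
      (PySem.Dict.empty : PySem.Dict (String × String) (PySem.Dict String Int)))).keys.Nodup :=
    PySem.Dict.nodup_keys_foldl_insert_key _ pvTriK _ _ PySem.Dict.nodup_keys_empty
  rw [PySem.Dict.items_eq_map_keys _ hndA PySem.Dict.empty]
  rw [PySem.Dict.items_foldl_insert_fresh
      (PySem.Set.ofList ((pvTri tokens).map pvTriK)) (fun k => k)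
      (fun k => (PySem.Dict.empty : PySem.Dict String Int).update
        (PySem.Dict.counter (((pvTri tokens).filter (fun t => pvTriK t == k)).map pvTriN)).items)
      PySem.Dict.empty
      (fun k _ => PySem.Dict.contains_empty _)
      (by simp [PySem.Set.nodup_ofList])]
  rw [PySem.Dict.keys_foldl_insert_key _ pvTriK]
  rw [show (PySem.Dict.empty : PySem.Dict (String × String) (PySem.Dict String Int)).items
        = [] from rfl, List.nil_append]
  simp only [PySem.Dict.keys_empty, PySem.Set.update_nil_left]
  apply List.map_congr_left
  intro k _
  rw [pv_getD_nested _ pvTriK pvTriN (fun _ => (1 : Int))]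
  simp only [PySem.Dict.getD_empty]
  rw [pv_update_empty_items _ (PySem.Dict.nodup_keys_counter _)]
  rw [PySem.Dict.counter_eq_foldl, List.foldl_map]
  have hf : List.filter (fun t => pvTriK t == k) (pvTri tokens)
      = List.filter (fun t => decide (pvTriK t = k)) (pvTri tokens) :=
    List.filter_congr (fun t _ => by rw [Bool.eq_iff_iff]; simp)
  rw [hf]
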